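-- pv_equiv track=rewrite | github.com/nb/iphone-versions | utils.py | cyr_from_lat_all
-- ===== SOURCE A (Python) =====
-- import string
--
-- def cyr_from_lat_all(word):
--     """Returns a list of all possible transliterations of a word"""
--     word = word.lower()
--     map = (
--     ('sht', u'щ'),
--     ('ia', u'иа', u'ия'),
--     ('ya', u'я'),
--     ('yu', u'ю'),
--     ('zh', u'ж', u'зх'),
--     ('ts', u'ц', u'тс'),
--     ('sh', u'ш', u'сх'),
--     ('ch', u'ч'),
--     #
--     ('a', u'а', u'ъ'),
--     ('b', u'б'),
--     ('c', u'ц'),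
--     ('d', u'д'),
--     ('e', u'е'),
--     ('f', u'ф'),
--     ('g', u'г'),
--     ('h', u'х'),
--     ('i', u'и'),
--     ('j', u'ж', u'й'),
--     ('k', u'к'),
--     ('l', u'л'),
--     ('m', u'м'),
--     ('n', u'н'),
--     ('o', u'о'),
--     ('p', u'п'),
--     ('q', u'я'),
--     ('r', u'р'),
--     ('s', u'с'),
--     ('t', u'т'),
--     ('u', u'у'),
--     ('v', u'в'),
--     ('w', u'в'),
--     ('x', u'кс'),
--     ('y', u'ъ', u'й'),
--     ('z', u'з'),
--     )
--     transliterations = []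
--     def rec(word, transliteration):
--         if word == '':
--             transliterations.append(transliteration)
--             return
--         if word[0] in string.whitespace:
--             rec(word[1:], transliteration + word[0])
--             return
--         for entry in map:
--             if word.startswith(entry[0]):
--                 for cyr in entry[1:]:
--                     rec(word[len(entry[0]):], transliteration + cyr)
--     rec(word, u'')
--     return transliterations
-- ===== SOURCE B (Python) =====
-- import string
--
-- # flattened transliteration table: one (latin key, cyrillic variant) pair per
-- # variant, in A's entry-then-variant order
-- PAIRS = (
--     ("sht", u"щ"),
--     ("ia", u"иа"), ("ia", u"ия"),
--     ("ya", u"я"),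
--     ("yu", u"ю"),
--     ("zh", u"ж"), ("zh", u"зх"),
--     ("ts", u"ц"), ("ts", u"тс"),
--     ("sh", u"ш"), ("sh", u"сх"),
--     ("ch", u"ч"),
--     ("a", u"а"), ("a", u"ъ"),
--     ("b", u"б"),
--     ("c", u"ц"),
--     ("d", u"д"),
--     ("e", u"е"),
--     ("f", u"ф"),
--     ("g", u"г"),
--     ("h", u"х"),
--     ("i", u"и"),
--     ("j", u"ж"), ("j", u"й"),
--     ("k", u"к"),
--     ("l", u"л"),
--     ("m", u"м"),
--     ("n", u"н"),
--     ("o", u"о"),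
--     ("p", u"п"),
--     ("q", u"я"),
--     ("r", u"р"),
--     ("s", u"с"),
--     ("t", u"т"),
--     ("u", u"у"),
--     ("v", u"в"),
--     ("w", u"в"),
--     ("x", u"кс"),
--     ("y", u"ъ"), ("y", u"й"),
--     ("z", u"з"),
-- )
--
-- def cyr_from_lat_all(word):
--     """Returns a list of all possible transliterations of a word
--     (right-to-left DP: dp[i] = all transliterations of word[i:])."""
--     word = word.lower()
--     n = len(word)
--     dp = [None] * (n + 1)
--     dp[n] = [u""]
--     for i in range(n - 1, -1, -1):
--         c = word[i]
--         if c in string.whitespace: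
--             dp[i] = [c + t for t in dp[i + 1]]
--         else:
--             dp[i] = [cyr + t
--                      for key, cyr in PAIRS
--                      if word.startswith(key, i)
--                      for t in dp[i + len(key)]]
--     return dp[0]
-- ===== Notes on version B (the rewrite author's own statement) =====
-- stated objective: alternative
-- what changed: Replaces A's prefix-accumulating recursive DFS over a nested (key, variants...) map with a right-to-left dynamic-programming pass over a flattened (key, variant) pair table, computing the transliteration list of every suffix exactly once.
import Mathlib
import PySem

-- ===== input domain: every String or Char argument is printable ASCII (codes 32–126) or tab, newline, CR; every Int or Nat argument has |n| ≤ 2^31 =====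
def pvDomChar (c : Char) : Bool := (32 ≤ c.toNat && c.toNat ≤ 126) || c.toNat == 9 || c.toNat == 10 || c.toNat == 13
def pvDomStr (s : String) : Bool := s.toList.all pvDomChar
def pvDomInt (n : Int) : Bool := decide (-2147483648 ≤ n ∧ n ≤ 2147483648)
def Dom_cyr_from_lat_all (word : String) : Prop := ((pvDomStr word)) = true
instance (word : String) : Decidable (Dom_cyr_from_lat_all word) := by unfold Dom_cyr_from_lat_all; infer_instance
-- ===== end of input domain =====

-- ===== PORT A =====
-- B replaces A's prefix-accumulating recursive DFS with a right-to-left DP over a flattened (key, variant) pair table (objective: alternative).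
-- A's nested map: each entry is a Latin key with its Cyrillic variants, in A's order
def translitMap : List (List Char × List (List Char)) := [
  (['s', 'h', 't'], [['щ']]),
  (['i', 'a'], [['и', 'а'], ['и', 'я']]),
  (['y', 'a'], [['я']]),
  (['y', 'u'], [['ю']]),
  (['z', 'h'], [['ж'], ['з', 'х']]),
  (['t', 's'], [['ц'], ['т', 'с']]),
  (['s', 'h'], [['ш'], ['с', 'х']]),
  (['c', 'h'], [['ч']]),
  (['a'], [['а'], ['ъ']]),
  (['b'], [['б']]),
  (['c'], [['ц']]),
  (['d'], [['д']]),
  (['e'], [['е']]),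
  (['f'], [['ф']]),
  (['g'], [['г']]),
  (['h'], [['х']]),
  (['i'], [['и']]),
  (['j'], [['ж'], ['й']]),
  (['k'], [['к']]),
  (['l'], [['л']]),
  (['m'], [['м']]),
  (['n'], [['н']]),
  (['o'], [['о']]),
  (['p'], [['п']]),
  (['q'], [['я']]),
  (['r'], [['р']]),
  (['s'], [['с']]),
  (['t'], [['т']]),
  (['u'], [['у']]),
  (['v'], [['в']]),
  (['w'], [['в']]),
  (['x'], [['к', 'с']]),
  (['y'], [['ъ'], ['й']]),
  (['z'], [['з']])
]

-- Python's string.whitespace, in its order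
def wsChars : List Char := [' ', '\t', '\n', '\r', Char.ofNat 11, Char.ofNat 12]

-- every key in the map is nonempty (cited by the termination proofs of recA and dSpec)
theorem translitMap_key_len : ∀ p ∈ translitMap, 1 ≤ p.1.length := by decide

-- A's inner 'rec(word, transliteration)': word as List Char, the accumulated prefix as List Char
def recA (w : List Char) (acc : List Char) : List (List Char) :=
  match w with
  | [] => [acc]
  | c :: rest =>
    if wsChars.contains c then recA rest (acc ++ [c])
    else translitMap.attach.foldl (fun res e =>
      if e.1.1 <+: (c :: rest) then
        res ++ e.1.2.foldl (fun r cyr => r ++ recA ((c :: rest).drop e.1.1.length) (acc ++ cyr)) []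
      else res) []
termination_by w.length
decreasing_by
  · simp
  · have h1 := translitMap_key_len e.1 e.2
    simp; omega

def cyr_from_lat_all (word : String) : List String :=
  (recA (PySem.Str.lower word).toList []).map (fun cs => String.ofList cs)

-- ===== PORT B =====
-- B's flattened table: one (latin key, cyrillic variant) pair per variant, in A's entry-then-variant order
def pairsB : List (String × String) := [
  ("sht", "щ"),
  ("ia", "иа"), ("ia", "ия"),
  ("ya", "я"),
  ("yu", "ю"),
  ("zh", "ж"), ("zh", "зх"),
  ("ts", "ц"), ("ts", "тс"),
  ("sh", "ш"), ("sh", "сх"),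
  ("ch", "ч"),
  ("a", "а"), ("a", "ъ"),
  ("b", "б"),
  ("c", "ц"),
  ("d", "д"),
  ("e", "е"),
  ("f", "ф"),
  ("g", "г"),
  ("h", "х"),
  ("i", "и"),
  ("j", "ж"), ("j", "й"),
  ("k", "к"),
  ("l", "л"),
  ("m", "м"),
  ("n", "н"),
  ("o", "о"),
  ("p", "п"),
  ("q", "я"),
  ("r", "р"),
  ("s", "с"),
  ("t", "т"),
  ("u", "у"),
  ("v", "в"),
  ("w", "в"),
  ("x", "кс"),
  ("y", "ъ"), ("y", "й"),
  ("z", "з")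
]

-- Python's string.whitespace as a string
def wsB : String := " \t\n\u000B\u000C\r"

-- one DP step: dp.headD = transliterations of the suffix one shorter than s; s = the current suffix (head c)
def stepAlt (c : Char) (s : List Char) (dp : List (List (List Char))) : List (List Char) :=
  if wsB.toList.contains c then (dp.headD []).map (fun t => c :: t)
  else pairsB.flatMap (fun p =>
    if p.1.toList <+: s then
      (dp.getD (p.1.toList.length - 1) []).map (fun t => p.2.toList ++ t)
    else [])

def cyr_from_lat_all_alt (word : String) : List String :=
  let st := (PySem.Str.lower word).toList.foldr
    (fun c (st : List Char × List (List (List Char))) =>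
      let s := c :: st.1
      (s, stepAlt c s st.2 :: st.2)) ([], [[[]]])
  (st.2.headD []).map (fun cs => String.ofList cs)

-- ===== PRECONDITION & SPEC =====
def Spec_cyr_from_lat_all (word : String) (out : List String) : Prop := out = cyr_from_lat_all_alt word
instance (word : String) (out : List String) : Decidable (Spec_cyr_from_lat_all word out) := by unfold Spec_cyr_from_lat_all; infer_instance

-- ===== CLAIM =====
def Claim_equal_cyr_from_lat_all : Prop := ∀ (word : String), Dom_cyr_from_lat_all word → Spec_cyr_from_lat_all word (cyr_from_lat_all word)

-- ===== LEMMAS AND PROOFS =====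

theorem foldl_ite_append {α β : Type} (l : List α) (P : α → Prop) [DecidablePred P]
    (g : α → List β) (init : List β) :
    l.foldl (fun res e => if P e then res ++ g e else res) init
      = init ++ l.flatMap (fun e => if P e then g e else []) := by
  rw [← PySem.List.foldl_append_eq_flatMap]
  congr 1
  funext res e
  split <;> simp

theorem flatMap_congr_mem {α β : Type} {l : List α} {f g : α → List β}
    (h : ∀ e ∈ l, f e = g e) : l.flatMap f = l.flatMap g := by
  simp only [List.flatMap_def]
  rw [List.map_congr_left h]

-- proof-only helper: dSpec w = all transliterations of the suffix w, in A's order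
def dSpec (w : List Char) : List (List Char) :=
  match w with
  | [] => [[]]
  | c :: rest =>
    if wsChars.contains c then (dSpec rest).map (fun t => c :: t)
    else translitMap.attach.flatMap (fun e =>
      if e.1.1 <+: (c :: rest) then
        e.1.2.flatMap (fun cyr => (dSpec ((c :: rest).drop e.1.1.length)).map (fun t => cyr ++ t))
      else [])
termination_by w.length
decreasing_by
  · simp
  · have h1 := translitMap_key_len e.1 e.2
    simp; omega

theorem recA_eq (n : Nat) : ∀ (w : List Char), w.length ≤ n → ∀ acc,
    recA w acc = (dSpec w).map (fun t => acc ++ t) := by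
  induction n with
  | zero =>
    intro w hw acc
    have : w = [] := by cases w <;> simp_all
    subst this
    simp [recA, dSpec]
  | succ n ih =>
    intro w hw acc
    match w with
    | [] => simp [recA, dSpec]
    | c :: rest =>
      rw [recA, dSpec]
      by_cases hws : wsChars.contains c
      · simp only [hws, if_true]
        rw [ih rest (by simp at hw; omega) (acc ++ [c])]
        simp [List.map_map, Function.comp, List.append_assoc]
      · simp only [hws, if_false, Bool.false_eq_true]
        rw [foldl_ite_append, List.map_flatMap, List.nil_append]
        apply flatMap_congr_mem
        intro e he
        have hk := translitMap_key_len e.1 e.2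
        have hlen : ((c :: rest).drop e.1.1.length).length ≤ n := by
          simp only [List.length_drop, List.length_cons]
          simp only [List.length_cons] at hw
          omega
        split_ifs with h
        · rw [PySem.List.foldl_append_eq_flatMap, List.nil_append, List.map_flatMap]
          apply flatMap_congr_mem
          intro cyr _
          rw [ih _ hlen (acc ++ cyr)]
          simp [List.map_map, Function.comp, List.append_assoc]
        · simp

theorem headD_tails_map (w : List Char) : (w.tails.map dSpec).headD [] = dSpec w := by
  cases w <;> simp

theorem attach_flatMap {α β : Type} (l : List α) (f : α → List β) :
    l.attach.flatMap (fun x => f x.1) = l.flatMap f := by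
  simp only [List.flatMap_def]
  rw [List.attach_map_val]

-- membership in string.whitespace is the same test on both sides
theorem ws_mem (c : Char) : wsB.toList.contains c = wsChars.contains c := by
  have h : wsB.toList = [' ', '\t', '\n', Char.ofNat 11, Char.ofNat 12, '\r'] := by decide
  rw [h]
  simp only [wsChars, List.contains_eq_mem, decide_eq_decide, List.mem_cons, List.not_mem_nil]
  tauto

-- B's flattened pair table, mapped to char lists, is the flattening of A's nested map
theorem pairs_flat :
    pairsB.map (fun p => (p.1.toList, p.2.toList))
      = translitMap.flatMap (fun e => e.2.map (fun v => (e.1, v))) := by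
  decide

theorem stepAlt_eq (c : Char) (rest : List Char) :
    stepAlt c (c :: rest) (rest.tails.map dSpec) = dSpec (c :: rest) := by
  rw [stepAlt, dSpec, ws_mem]
  by_cases hws : wsChars.contains c
  · simp only [hws, if_true]
    rw [headD_tails_map]
  · simp only [hws, if_false, Bool.false_eq_true]
    rw [attach_flatMap translitMap (fun q =>
      if q.1 <+: (c :: rest) then
        q.2.flatMap (fun cyr => (dSpec ((c :: rest).drop q.1.length)).map (fun t => cyr ++ t))
      else [])]
    have hmap : pairsB.flatMap (fun p =>
        if p.1.toList <+: (c :: rest) then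
          (((rest.tails.map dSpec)).getD (p.1.toList.length - 1) []).map
            (fun t => p.2.toList ++ t)
        else [])
      = (pairsB.map (fun p => (p.1.toList, p.2.toList))).flatMap (fun q =>
          if q.1 <+: (c :: rest) then
            (((rest.tails.map dSpec)).getD (q.1.length - 1) []).map (fun t => q.2 ++ t)
          else []) := by
      rw [List.flatMap_map]
    rw [hmap, pairs_flat, List.flatMap_assoc]
    apply flatMap_congr_mem
    intro e he
    have hk := translitMap_key_len e he
    rw [List.flatMap_map]
    split_ifs with h
    · apply flatMap_congr_mem
      intro cyr _
      have hkle : e.1.length ≤ rest.length + 1 := by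
        have := h.length_le
        simpa using this
      have hidx : e.1.length - 1 < (rest.tails.map dSpec).length := by
        simp [List.length_tails]
        omega
      rw [List.getD_eq_getElem _ _ hidx]
      obtain ⟨k', hk'⟩ : ∃ k', e.1.length = k' + 1 := ⟨e.1.length - 1, by omega⟩
      simp [hk', List.getElem_tails, List.drop_succ_cons]
    · simp

theorem foldrB_eq (w : List Char) :
    (w.foldr (fun c (st : List Char × List (List (List Char))) =>
      (c :: st.1, stepAlt c (c :: st.1) st.2 :: st.2)) ([], [[[]]]))
      = (w, w.tails.map dSpec) := by
  induction w with
  | nil => simp [dSpec]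
  | cons c rest ih =>
    simp only [List.foldr_cons, ih]
    simp [stepAlt_eq]

-- ===== VERDICT =====
theorem cyr_from_lat_all_spec : Claim_equal_cyr_from_lat_all := by
  unfold Claim_equal_cyr_from_lat_all Spec_cyr_from_lat_all
  intro word _
  unfold cyr_from_lat_all cyr_from_lat_all_alt
  rw [recA_eq (PySem.Str.lower word).toList.length _ le_rfl]
  simp only [foldrB_eq, headD_tails_map]
  simp
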